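-- pv_equiv track=rewrite | github.com/sjurmsc/MSC2023 | Scripts/Log.py | gname
-- ===== SOURCE A (Python) =====
-- def gname(old_name):
--     """ Takes in the state of group names and outputs the next one
--     """
--     if not len(old_name): raise TypeError('Max group name encountered')
--     new_name = old_name
--     if old_name[-1] != 'Z':
--         new_name = old_name[:-1] + chr(ord(old_name[-1])+1)
--     else:
--         new_name = gname(old_name[:-1]) + 'A'
--     return new_name
-- ===== SOURCE B (Python) =====
-- def gname(old_name):
--     """ Takes in the state of group names and outputs the next one """
--     if not len(old_name): raise TypeError('Max group name encountered')
--     chars = list(old_name)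
--     i = len(chars) - 1
--     while i >= 0 and chars[i] == 'Z':
--         chars[i] = 'A'
--         i -= 1
--     if i < 0:
--         raise TypeError('Max group name encountered')
--     chars[i] = chr(ord(chars[i]) + 1)
--     return ''.join(chars)
-- ===== Notes on version B (the rewrite author's own statement) =====
-- stated objective: alternative
-- what changed: Replaces the recursion (which rebuilds the string with slicing at every carry) by a single iterative carry loop over a char list with one index.
import Mathlib
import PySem

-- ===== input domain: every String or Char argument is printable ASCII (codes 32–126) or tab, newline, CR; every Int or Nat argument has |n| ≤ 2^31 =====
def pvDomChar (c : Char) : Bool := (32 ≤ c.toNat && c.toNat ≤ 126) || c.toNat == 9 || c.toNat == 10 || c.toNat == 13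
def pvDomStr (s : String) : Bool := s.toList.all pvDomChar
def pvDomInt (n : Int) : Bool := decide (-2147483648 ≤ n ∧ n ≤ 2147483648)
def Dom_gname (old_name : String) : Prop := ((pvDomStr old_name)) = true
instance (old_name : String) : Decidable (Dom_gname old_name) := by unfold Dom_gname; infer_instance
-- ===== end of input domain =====

-- B replaces A's string-slicing recursion by a single iterative carry loop over the characters; objective: alternative.


-- ===== PORT A =====
-- A's recursion on the string: old_name[-1] is the head of the reversed char list,
-- old_name[:-1] is the reverse of its tail.  The [] case is where Python raises TypeError
-- (excluded by Pre_gname); its value is irrelevant.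
def gnameListA (l : List Char) : List Char :=
  match h : l.reverse with
  | [] => []
  | last :: initRev =>
      if last ≠ 'Z' then initRev.reverse ++ [Char.ofNat (last.toNat + 1)]
      else gnameListA initRev.reverse ++ ['A']
termination_by l.length
decreasing_by
  have : l.length = initRev.length + 1 := by
    have := congrArg List.length h; simpa using this
  simp [this]

def gname (old_name : String) : String := String.mk (gnameListA old_name.toList)

-- ===== PORT B =====
-- B's while loop scans from the last index, turning 'Z' into 'A' until a non-'Z' char,
-- which it increments; carry works on the reversed char list. [] = overflow (raise, excluded).
def carryB : List Char → List Char
  | [] => []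
  | c :: rest => if c = 'Z' then 'A' :: carryB rest else Char.ofNat (c.toNat + 1) :: rest

def gname_alt (old_name : String) : String :=
  String.mk ((carryB old_name.toList.reverse).reverse)

-- ===== PRECONDITION & SPEC =====
-- Pre_ excludes exactly the inputs where Python A raises TypeError: the empty string and all-'Z' strings.
def Pre_gname (old_name : String) : Prop := (old_name.toList.any (fun c => c ≠ 'Z')) = true
instance (old_name : String) : Decidable (Pre_gname old_name) := by unfold Pre_gname; infer_instance
def pvWitness_gname : String := "AZ"

def Spec_gname (old_name : String) (out : String) : Prop := out = gname_alt old_name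
instance (old_name : String) (out : String) : Decidable (Spec_gname old_name out) := by unfold Spec_gname; infer_instance

-- ===== CLAIM (what is proved, stated in full; the proofs are below) =====
def Claim_equal_gname : Prop := ∀ (old_name : String), Dom_gname old_name → Pre_gname old_name → Spec_gname old_name (gname old_name)

-- ===== LEMMAS AND PROOFS =====

theorem gnameListA_snoc (last : Char) (init : List Char) :
    gnameListA (init ++ [last]) =
      if last ≠ 'Z' then init ++ [Char.ofNat (last.toNat + 1)]
      else gnameListA init ++ ['A'] := by
  rw [gnameListA]
  rw [show (init ++ [last]).reverse = last :: init.reverse from by simp]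
  simp

theorem key (r : List Char) (h : ∃ c ∈ r, c ≠ 'Z') :
    gnameListA r.reverse = (carryB r).reverse := by
  induction r with
  | nil => simp at h
  | cons c rest ih =>
    have hs : (c :: rest).reverse = rest.reverse ++ [c] := by simp
    rw [hs, gnameListA_snoc]
    by_cases hc : c = 'Z'
    · subst hc
      have hrest : ∃ d ∈ rest, d ≠ 'Z' := by
        rcases h with ⟨d, hd, hne⟩
        rcases List.mem_cons.mp hd with hd1 | hd1
        · exact absurd hd1 hne
        · exact ⟨d, hd1, hne⟩
      simp [carryB, ih hrest]
    · simp [carryB, hc]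

-- ===== VERDICT (by name: the statement is the Claim_ definition above) =====
theorem gname_spec : Claim_equal_gname := by
  intro s _ hpre
  unfold Spec_gname gname gname_alt
  exact congrArg String.mk (by simpa using key s.toList.reverse (by unfold Pre_gname at hpre; simpa [List.any_eq_true] using hpre))
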